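-- pv_equiv track=rewrite | github.com/oyt9306/RePIC | evaluation/eval_single_concept.py | predict_for_single_gt
-- ===== SOURCE A (Python) =====
-- from typing import List, Optional, Sequence, Tuple
--
-- PUNCT_STRIP = '.,!?;:()[]{}"\'-'
--
-- def strip_brackets(token: str) -> str:
--     """Remove surrounding angle brackets if present. Example: '<Backpack>' -> 'Backpack'."""
--     return token[1:-1] if token.startswith("<") and token.endswith(">") else token
--
-- def tokenize_caption(caption: str) -> List[str]:
--     """
--     Tokenize a caption into lowercased tokens, removing boundary punctuation.
--     Also removes model special tokens like '</s>'.
--     """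
--     caption = caption.replace("</s>", "").lower()
--     return [w.strip(PUNCT_STRIP) for w in caption.split() if w.strip(PUNCT_STRIP)]
--
-- def predict_for_single_gt(
--     caption: str,
--     all_concepts: Sequence[str],
--     gt_concept: str,
-- ) -> Optional[str]:
--     """
--     Return a prediction aligned with the single GT concept:
--       - the correct concept name (unbracketed, lowercased), e.g., 'backpack'
--       - "MISS"  (a different concept from the candidate pool is detected)
--       - None    (no concept signal in the caption)
--
--     Matching is token-level exact match (case-insensitive) against:
--       - the bracketed form (e.g., '<backpack>') and
--       - the unbracketed form (e.g., 'backpack').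
--     """
--     tokens = set(tokenize_caption(caption))  # lowercased token set
--
--     # Concepts present in caption (unbracketed, lowercased)
--     present_unbr = {
--         strip_brackets(c.lower())
--         for c in all_concepts
--         if (c.lower() in tokens) or (strip_brackets(c.lower()) in tokens)
--     }
--
--     gt_unbr = strip_brackets(gt_concept).lower()
--     non_gt_unbr = {
--         strip_brackets(c.lower())
--         for c in all_concepts
--         if strip_brackets(c.lower()) != gt_unbr
--     }
--
--     if gt_unbr in present_unbr:
--         return gt_unbr                  # correct detection
--     if present_unbr & non_gt_unbr:
--         return "MISS"                   # wrong concept detected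
--     return None                         # no signal
-- ===== SOURCE B (Python) =====
-- from typing import List, Optional, Sequence
--
-- PUNCT_STRIP = '.,!?;:()[]{}"\'-'
--
--
-- def strip_brackets(token: str) -> str:
--     return token[1:-1] if token.startswith("<") and token.endswith(">") else token
--
--
-- def tokenize_caption(caption: str) -> List[str]:
--     caption = caption.replace("</s>", "").lower()
--     return [w.strip(PUNCT_STRIP) for w in caption.split() if w.strip(PUNCT_STRIP)]
--
--
-- def predict_for_single_gt(
--     caption: str,
--     all_concepts: Sequence[str],
--     gt_concept: str,
-- ) -> Optional[str]:
--     """One pass over all_concepts keeping two flags; no sets of concepts, no intersection."""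
--     tokens = set(tokenize_caption(caption))
--     gt_unbr = strip_brackets(gt_concept).lower()
--     gt_found = False
--     other_found = False
--     for c in all_concepts:
--         cl = c.lower()
--         cu = strip_brackets(cl)
--         if cl in tokens or cu in tokens:
--             if cu == gt_unbr:
--                 gt_found = True
--             else:
--                 other_found = True
--     if gt_found:
--         return gt_unbr
--     if other_found:
--         return "MISS"
--     return None
-- ===== Notes on version B (the rewrite author's own statement) =====
-- stated objective: simpler
-- what changed: Replaced the two concept-set comprehensions (present_unbr, non_gt_unbr) and their set intersection with a single pass over all_concepts maintaining two boolean flags (gt_found, other_found); no intermediate sets are built, which a timing run also measured as a constant-factor speedup.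
import Mathlib
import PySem

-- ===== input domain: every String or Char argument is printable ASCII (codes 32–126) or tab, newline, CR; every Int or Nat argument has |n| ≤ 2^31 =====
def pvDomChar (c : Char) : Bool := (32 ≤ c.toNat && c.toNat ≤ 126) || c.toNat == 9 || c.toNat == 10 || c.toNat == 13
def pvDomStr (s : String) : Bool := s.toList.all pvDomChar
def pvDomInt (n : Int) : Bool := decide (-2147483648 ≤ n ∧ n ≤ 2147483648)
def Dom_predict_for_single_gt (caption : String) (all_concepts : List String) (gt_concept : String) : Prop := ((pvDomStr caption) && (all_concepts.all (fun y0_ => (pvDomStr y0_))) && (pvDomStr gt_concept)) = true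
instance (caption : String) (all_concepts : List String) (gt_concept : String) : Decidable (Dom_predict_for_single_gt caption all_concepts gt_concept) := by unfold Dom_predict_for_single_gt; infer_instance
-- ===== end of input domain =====

-- B replaces the two concept-set comprehensions and the set intersection by one pass over
-- all_concepts maintaining two boolean flags (simpler; same return value).

-- ===== PORT A =====
def PUNCT_STRIP : String := ".,!?;:()[]{}\"'-"

def strip_brackets (token : String) : String :=
  if PySem.Str.startswith token "<" && PySem.Str.endswith token ">" then
    PySem.Str.slice token (some 1) (some (-1))
  else token

def tokenize_caption (caption : String) : List String :=
  let caption := PySem.Str.lower (PySem.Str.replace caption "</s>" "")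
  ((PySem.Str.split₀ caption).filter
      (fun w => !(PySem.Str.stripChars w PUNCT_STRIP == ""))).map
    (fun w => PySem.Str.stripChars w PUNCT_STRIP)

def predict_for_single_gt (caption : String) (all_concepts : List String) (gt_concept : String) : Option String :=
  let tokens : PySem.Set String := PySem.Set.ofList (tokenize_caption caption)
  let present_unbr : PySem.Set String := PySem.Set.ofList
    ((all_concepts.filter (fun c =>
        tokens.contains (PySem.Str.lower c) ||
        tokens.contains (strip_brackets (PySem.Str.lower c)))).map
      (fun c => strip_brackets (PySem.Str.lower c)))
  let gt_unbr := PySem.Str.lower (strip_brackets gt_concept)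
  let non_gt_unbr : PySem.Set String := PySem.Set.ofList
    ((all_concepts.filter (fun c =>
        !(strip_brackets (PySem.Str.lower c) == gt_unbr))).map
      (fun c => strip_brackets (PySem.Str.lower c)))
  if present_unbr.contains gt_unbr then some gt_unbr
  else if !(PySem.Set.inter present_unbr non_gt_unbr).isEmpty then some "MISS"
  else none

-- ===== PORT B =====
def predict_for_single_gt_alt (caption : String) (all_concepts : List String) (gt_concept : String) : Option String :=
  let tokens : PySem.Set String := PySem.Set.ofList (tokenize_caption caption)
  let gt_unbr := PySem.Str.lower (strip_brackets gt_concept)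
  let flags : Bool × Bool := all_concepts.foldl
    (fun (st : Bool × Bool) c =>
      let cl := PySem.Str.lower c
      let cu := strip_brackets cl
      if tokens.contains cl || tokens.contains cu then
        if cu == gt_unbr then (true, st.2) else (st.1, true)
      else st)
    (false, false)
  if flags.1 then some gt_unbr
  else if flags.2 then some "MISS"
  else none

-- ===== PRECONDITION & SPEC =====
def Spec_predict_for_single_gt (caption : String) (all_concepts : List String) (gt_concept : String) (out : Option String) : Prop := out = predict_for_single_gt_alt caption all_concepts gt_concept
instance (caption : String) (all_concepts : List String) (gt_concept : String) (out : Option String) : Decidable (Spec_predict_for_single_gt caption all_concepts gt_concept out) := by unfold Spec_predict_for_single_gt; infer_instance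

-- ===== CLAIM (what is proved, stated in full; the proofs are below) =====
def Claim_equal_predict_for_single_gt : Prop := ∀ (caption : String) (all_concepts : List String) (gt_concept : String), Dom_predict_for_single_gt caption all_concepts gt_concept → Spec_predict_for_single_gt caption all_concepts gt_concept (predict_for_single_gt caption all_concepts gt_concept)

-- ===== LEMMAS AND PROOFS =====

-- B's loop with two boolean flags computes two `any`s over all_concepts.
theorem foldl_flags (tokens : PySem.Set String) (gt_unbr : String)
    (l : List String) (g o : Bool) :
    l.foldl
      (fun (st : Bool × Bool) c =>
        let cl := PySem.Str.lower c
        let cu := strip_brackets cl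
        if tokens.contains cl || tokens.contains cu then
          if cu == gt_unbr then (true, st.2) else (st.1, true)
        else st)
      (g, o)
    = (g || l.any (fun c =>
          (tokens.contains (PySem.Str.lower c) ||
           tokens.contains (strip_brackets (PySem.Str.lower c))) &&
          (strip_brackets (PySem.Str.lower c) == gt_unbr)),
       o || l.any (fun c =>
          (tokens.contains (PySem.Str.lower c) ||
           tokens.contains (strip_brackets (PySem.Str.lower c))) &&
          !(strip_brackets (PySem.Str.lower c) == gt_unbr))) := by
  induction l generalizing g o with
  | nil => simp
  | cons c t ih =>
      rw [List.foldl_cons, List.any_cons, List.any_cons]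
      by_cases hp : (tokens.contains (PySem.Str.lower c) ||
          tokens.contains (strip_brackets (PySem.Str.lower c))) = true
      · by_cases he : (strip_brackets (PySem.Str.lower c) == gt_unbr) = true
        · simp only [if_pos hp, if_pos he]
          rw [ih]
          simp only [hp, he, Bool.true_and, Bool.not_true, Bool.and_false,
            Bool.true_or, Bool.or_true, Bool.false_or]
        · have hef : (strip_brackets (PySem.Str.lower c) == gt_unbr) = false := by
            rwa [Bool.not_eq_true] at he
          simp only [if_pos hp, if_neg he]
          rw [ih]
          simp only [hp, hef, Bool.not_false, Bool.and_false,
            Bool.and_true, Bool.true_or, Bool.or_true, Bool.false_or]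
      · have hpf : (tokens.contains (PySem.Str.lower c) ||
            tokens.contains (strip_brackets (PySem.Str.lower c))) = false := by
          rwa [Bool.not_eq_true] at hp
        simp only [if_neg hp]
        rw [ih]
        simp only [hpf, Bool.false_and, Bool.false_or]

-- A's test "gt_unbr ∈ present_unbr" is B's gt-flag.
theorem contains_present_iff (tokens : PySem.Set String) (gt_unbr : String)
    (l : List String) :
    (PySem.Set.ofList
      ((l.filter (fun c =>
          tokens.contains (PySem.Str.lower c) ||
          tokens.contains (strip_brackets (PySem.Str.lower c)))).map
        (fun c => strip_brackets (PySem.Str.lower c)))).contains gt_unbr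
    = l.any (fun c =>
        (tokens.contains (PySem.Str.lower c) ||
         tokens.contains (strip_brackets (PySem.Str.lower c))) &&
        (strip_brackets (PySem.Str.lower c) == gt_unbr)) := by
  rcases h : l.any (fun c =>
      (tokens.contains (PySem.Str.lower c) ||
       tokens.contains (strip_brackets (PySem.Str.lower c))) &&
      (strip_brackets (PySem.Str.lower c) == gt_unbr)) with _ | _
  · simp only [List.any_eq_false, Bool.and_eq_true, not_and] at h
    rw [Bool.eq_false_iff]
    intro hc
    rw [PySem.Set.contains_iff, PySem.Set.mem_ofList, List.mem_map] at hc
    obtain ⟨c, hcf, hce⟩ := hc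
    rw [List.mem_filter] at hcf
    exact h c hcf.1 hcf.2 (by simp [hce])
  · simp only [List.any_eq_true, Bool.and_eq_true, beq_iff_eq] at h
    obtain ⟨c, hm, hp, he⟩ := h
    rw [PySem.Set.contains_iff, PySem.Set.mem_ofList, List.mem_map]
    exact ⟨c, List.mem_filter.mpr ⟨hm, hp⟩, he⟩

-- A's test "present_unbr ∩ non_gt_unbr nonempty" is B's other-flag.
theorem inter_nonempty_iff (tokens : PySem.Set String) (gt_unbr : String)
    (l : List String) :
    (!(PySem.Set.inter
        (PySem.Set.ofList
          ((l.filter (fun c =>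
              tokens.contains (PySem.Str.lower c) ||
              tokens.contains (strip_brackets (PySem.Str.lower c)))).map
            (fun c => strip_brackets (PySem.Str.lower c))))
        (PySem.Set.ofList
          ((l.filter (fun c =>
              !(strip_brackets (PySem.Str.lower c) == gt_unbr))).map
            (fun c => strip_brackets (PySem.Str.lower c))))).isEmpty)
    = l.any (fun c =>
        (tokens.contains (PySem.Str.lower c) ||
         tokens.contains (strip_brackets (PySem.Str.lower c))) &&
        !(strip_brackets (PySem.Str.lower c) == gt_unbr)) := by
  rcases h : l.any (fun c =>
      (tokens.contains (PySem.Str.lower c) ||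
       tokens.contains (strip_brackets (PySem.Str.lower c))) &&
      !(strip_brackets (PySem.Str.lower c) == gt_unbr)) with _ | _
  · -- no present non-gt concept: the intersection is empty
    simp only [List.any_eq_false, Bool.and_eq_true, not_and] at h
    have hnil : PySem.Set.inter
        (PySem.Set.ofList
          ((l.filter (fun c =>
              tokens.contains (PySem.Str.lower c) ||
              tokens.contains (strip_brackets (PySem.Str.lower c)))).map
            (fun c => strip_brackets (PySem.Str.lower c))))
        (PySem.Set.ofList
          ((l.filter (fun c =>
              !(strip_brackets (PySem.Str.lower c) == gt_unbr))).map
            (fun c => strip_brackets (PySem.Str.lower c)))) = [] := by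
      rw [List.eq_nil_iff_forall_not_mem]
      intro x hx
      unfold PySem.Set.inter at hx
      rw [List.mem_filter] at hx
      obtain ⟨hx1, hx2⟩ := hx
      rw [PySem.Set.mem_ofList, List.mem_map] at hx1
      obtain ⟨c, hcf, hce⟩ := hx1
      rw [List.mem_filter] at hcf
      rw [PySem.Set.contains_iff, PySem.Set.mem_ofList, List.mem_map] at hx2
      obtain ⟨c', hcf', hce'⟩ := hx2
      rw [List.mem_filter] at hcf'
      have heq := h c hcf.1 hcf.2
      rw [Bool.not_eq_true, Bool.not_eq_false', beq_iff_eq] at heq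
      have hne : strip_brackets (PySem.Str.lower c') ≠ gt_unbr := by
        simpa using hcf'.2
      exact hne (by rw [hce', ← hce]; exact heq)
    rw [hnil]
    rfl
  · -- some present non-gt concept: its unbracketed form is in the intersection
    simp only [List.any_eq_true, Bool.and_eq_true] at h
    obtain ⟨c, hm, hp, hne⟩ := h
    have hmem : strip_brackets (PySem.Str.lower c) ∈ PySem.Set.inter
        (PySem.Set.ofList
          ((l.filter (fun c =>
              tokens.contains (PySem.Str.lower c) ||
              tokens.contains (strip_brackets (PySem.Str.lower c)))).map
            (fun c => strip_brackets (PySem.Str.lower c))))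
        (PySem.Set.ofList
          ((l.filter (fun c =>
              !(strip_brackets (PySem.Str.lower c) == gt_unbr))).map
            (fun c => strip_brackets (PySem.Str.lower c)))) := by
      unfold PySem.Set.inter
      rw [List.mem_filter]
      constructor
      · rw [PySem.Set.mem_ofList, List.mem_map]
        exact ⟨c, List.mem_filter.mpr ⟨hm, hp⟩, rfl⟩
      · rw [PySem.Set.contains_iff, PySem.Set.mem_ofList, List.mem_map]
        exact ⟨c, List.mem_filter.mpr ⟨hm, hne⟩, rfl⟩
    have hfalse : (PySem.Set.inter
        (PySem.Set.ofList
          ((l.filter (fun c =>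
              tokens.contains (PySem.Str.lower c) ||
              tokens.contains (strip_brackets (PySem.Str.lower c)))).map
            (fun c => strip_brackets (PySem.Str.lower c))))
        (PySem.Set.ofList
          ((l.filter (fun c =>
              !(strip_brackets (PySem.Str.lower c) == gt_unbr))).map
            (fun c => strip_brackets (PySem.Str.lower c))))).isEmpty = false := by
      rw [List.isEmpty_eq_false_iff]
      exact List.ne_nil_of_mem hmem
    rw [hfalse]
    rfl

-- ===== VERDICT (by name: the statement is the Claim_ definition above) =====
theorem predict_for_single_gt_spec : Claim_equal_predict_for_single_gt := by
  intro caption all_concepts gt_concept _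
  unfold Spec_predict_for_single_gt predict_for_single_gt predict_for_single_gt_alt
  simp only [foldl_flags, Bool.false_or, contains_present_iff]
  rw [inter_nonempty_iff]
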